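-- pv_equiv track=rewrite | github.com/tmu-nlp/100knock2024 | kexinb/chapter04/knock34.py | extract_consecutive
-- ===== SOURCE A (Python) =====
-- def extract_consecutive(sentences, pos):
--     result = []
--     for sentence in sentences:
--         currPhrase, cnt = "", 0
--         for morph in sentence:
--             if morph["pos"] == pos:
--                 cnt += 1
--                 currPhrase += morph["surface"]
--             else:
--                 if cnt > 1:
--                     result.append(currPhrase)
--                 currPhrase, cnt = "", 0
--         # Check EOS for remaining noun phrase
--         if cnt > 1:
--             result.append(currPhrase)
--     return result
-- ===== SOURCE B (Python) =====
-- def extract_consecutive(sentences, pos):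
--     # Run scanner: slice out each maximal run of matching morphemes and join it,
--     # instead of A's per-morpheme accumulator/counter state machine.
--     result = []
--     for sentence in sentences:
--         rest = sentence
--         while rest:
--             if rest[0]["pos"] != pos:
--                 rest = rest[1:]
--             else:
--                 k = 1
--                 while k < len(rest) and rest[k]["pos"] == pos:
--                     k += 1
--                 if k > 1:
--                     result.append("".join(m["surface"] for m in rest[:k]))
--                 rest = rest[k:]
--     return result
-- ===== Notes on version B (the rewrite author's own statement) =====
-- stated objective: alternative
-- what changed: Replaces A's per-morpheme accumulator/counter state machine with a run scanner that slices out each maximal run of matching morphemes and joins its surfaces directly; Pre_ excludes inputs on which A raises KeyError (a morpheme without a 'pos' key, or a matching morpheme without a 'surface' key).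
import Mathlib
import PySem

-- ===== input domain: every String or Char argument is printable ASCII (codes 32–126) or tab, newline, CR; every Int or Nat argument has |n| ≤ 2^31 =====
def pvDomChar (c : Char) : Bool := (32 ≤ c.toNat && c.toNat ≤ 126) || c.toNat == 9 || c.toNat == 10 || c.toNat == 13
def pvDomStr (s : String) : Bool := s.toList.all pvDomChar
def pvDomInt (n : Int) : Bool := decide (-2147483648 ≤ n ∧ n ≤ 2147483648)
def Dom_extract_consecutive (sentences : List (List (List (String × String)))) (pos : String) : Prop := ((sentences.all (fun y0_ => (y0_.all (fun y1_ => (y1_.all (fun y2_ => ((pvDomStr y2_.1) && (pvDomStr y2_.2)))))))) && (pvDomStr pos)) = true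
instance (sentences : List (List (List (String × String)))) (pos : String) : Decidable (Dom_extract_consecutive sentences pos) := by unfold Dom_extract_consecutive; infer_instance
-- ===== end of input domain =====

-- B replaces A's per-morpheme accumulator/counter state machine with a run scanner
-- (extract each maximal run of matching morphemes, join it if longer than 1); same cost, plainer traversal.

-- morph["k"]: first-match lookup in the association list; Pre_ guarantees the key is
-- present wherever A evaluates it, so the `getD ""` default is never used inside Pre_.
def pvGetItem (m : List (String × String)) (k : String) : String :=
  ((PySem.Dict.mk m).get? k).getD ""

-- ===== PORT A =====
-- the inner `for morph in sentence` loop of A, carried state (result, currPhrase, cnt)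
def aLoop (pos : String) (res : List String) (phrase : String) (cnt : Int) :
    List (List (String × String)) → List String
  | [] => if cnt > 1 then res ++ [phrase] else res
  | m :: rest =>
    if pvGetItem m "pos" == pos then
      aLoop pos res (phrase ++ pvGetItem m "surface") (cnt + 1) rest
    else
      aLoop pos (if cnt > 1 then res ++ [phrase] else res) "" 0 rest

def extract_consecutive (sentences : List (List (List (String × String)))) (pos : String) : List String :=
  sentences.foldl (fun res sentence => aLoop pos res "" 0 sentence) []

-- ===== PORT B =====
def bKey (pos : String) (m : List (String × String)) : Bool := pvGetItem m "pos" == pos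

-- '"".join(m["surface"] for m in run)' (separator is empty, so plain concatenation)
def bJoin : List (List (String × String)) → String
  | [] => ""
  | m :: r => pvGetItem m "surface" ++ bJoin r

-- B's `while rest:` scanner: drop a non-matching head, or slice off the maximal
-- matching run rest[:k] (takeWhile) and continue at rest[k:] (dropWhile)
def bScan (pos : String) : List (List (String × String)) → List String
  | [] => []
  | m :: rest =>
    if bKey pos m then
      (if (List.takeWhile (bKey pos) (m :: rest)).length > 1 then
        [bJoin (List.takeWhile (bKey pos) (m :: rest))] else []) ++
      bScan pos (List.dropWhile (bKey pos) rest)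
    else
      bScan pos rest
  termination_by l => l.length
  decreasing_by
  · simpa using Nat.lt_succ_of_le (List.length_dropWhile_le (bKey pos) rest)
  · simp

def extract_consecutive_alt (sentences : List (List (List (String × String)))) (pos : String) : List String :=
  sentences.foldl (fun res sentence => res ++ bScan pos sentence) []

-- ===== PRECONDITION & SPEC =====
-- Pre_ excludes exactly the inputs on which A raises KeyError: a morpheme without a
-- "pos" key, or a morpheme whose "pos" equals pos but which has no "surface" key.
def Pre_extract_consecutive (sentences : List (List (List (String × String)))) (pos : String) : Prop :=
  ∀ s ∈ sentences, ∀ m ∈ s,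
    ((PySem.Dict.mk m).get? "pos").isSome = true ∧
    ((PySem.Dict.mk m).get? "pos" = some pos → ((PySem.Dict.mk m).get? "surface").isSome = true)
instance (sentences : List (List (List (String × String)))) (pos : String) : Decidable (Pre_extract_consecutive sentences pos) := by unfold Pre_extract_consecutive; infer_instance

def pvWitness_extract_consecutive : (List (List (List (String × String)))) × String :=
  ([[[("pos", "N"), ("surface", "ab")], [("pos", "N"), ("surface", "c")], [("pos", "V"), ("surface", "x")]]], "N")

def Spec_extract_consecutive (sentences : List (List (List (String × String)))) (pos : String) (out : List String) : Prop := out = extract_consecutive_alt sentences pos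
instance (sentences : List (List (List (String × String)))) (pos : String) (out : List String) : Decidable (Spec_extract_consecutive sentences pos out) := by unfold Spec_extract_consecutive; infer_instance

-- ===== CLAIM (what is proved, stated in full; the proofs are below) =====
def Claim_equal_extract_consecutive : Prop := ∀ (sentences : List (List (List (String × String)))) (pos : String), Dom_extract_consecutive sentences pos → Pre_extract_consecutive sentences pos → Spec_extract_consecutive sentences pos (extract_consecutive sentences pos)

-- ===== LEMMAS AND PROOFS =====

-- the result list factors out of A's inner loop
theorem aLoop_factor (pos : String) (s : List (List (String × String))) :
    ∀ (res : List String) (phrase : String) (cnt : Int),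
      aLoop pos res phrase cnt s = res ++ aLoop pos [] phrase cnt s := by
  induction s with
  | nil => intro res phrase cnt; simp [aLoop]; split_ifs <;> simp
  | cons m rest ih =>
    intro res phrase cnt
    simp only [aLoop]
    split_ifs with hk hc
    · exact ih res _ _
    · rw [ih (res ++ [phrase]) "" 0, List.nil_append, ih [phrase] "" 0]; simp
    · rw [ih res "" 0, ih [] "" 0]

-- A's loop on a pending state (phrase, cnt) = emit the current run, continue after it
theorem aLoop_run (pos : String) (s : List (List (String × String))) :
    ∀ (phrase : String) (cnt : Int),
      aLoop pos [] phrase cnt s =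
        (if cnt + ((List.takeWhile (bKey pos) s).length : Int) > 1 then
          [phrase ++ bJoin (List.takeWhile (bKey pos) s)] else []) ++
        aLoop pos [] "" 0 (List.dropWhile (bKey pos) s) := by
  induction s with
  | nil =>
    intro phrase cnt
    have h0 : ¬ ((0:Int) > 1) := by norm_num
    simp only [List.takeWhile_nil, List.dropWhile_nil, bJoin, List.length_nil,
      Nat.cast_zero, add_zero, aLoop, h0, if_false, List.append_nil]
    split_ifs with h <;> simp
  | cons m rest ih =>
    intro phrase cnt
    by_cases hk : bKey pos m
    · have hk' : (pvGetItem m "pos" == pos) = true := hk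
      simp only [aLoop, hk', if_true, List.takeWhile_cons_of_pos hk, List.dropWhile_cons_of_pos hk]
      rw [ih (phrase ++ pvGetItem m "surface") (cnt + 1)]
      congr 1
      have hc : (cnt + 1 + ((List.takeWhile (bKey pos) rest).length : Int) > 1) ↔
          (cnt + ((m :: List.takeWhile (bKey pos) rest).length : Int) > 1) := by
        simp only [List.length_cons]; push_cast; omega
      rw [if_congr hc rfl rfl]
      split_ifs with h
      · simp [bJoin, String.append_assoc]
      · rfl
    · have hkf : bKey pos m = false := by revert hk; cases bKey pos m <;> simp
      have hk' : (pvGetItem m "pos" == pos) = false := by simpa [bKey] using hkf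
      rw [List.takeWhile_cons_of_neg (by simp [hkf]), List.dropWhile_cons_of_neg (by simp [hkf])]
      have h0 : ¬ ((0:Int) > 1) := by norm_num
      conv_rhs => rw [aLoop]
      simp only [aLoop, hk', Bool.false_eq_true, if_false, bJoin, List.length_nil,
        Nat.cast_zero, add_zero, h0]
      rw [aLoop_factor]
      split_ifs with hc <;> simp

-- A's loop from the initial state = B's run scanner
theorem aLoop_eq_bScan (pos : String) :
    ∀ (n : Nat) (s : List (List (String × String))), s.length ≤ n →
      aLoop pos [] "" 0 s = bScan pos s := by
  intro n
  induction n with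
  | zero =>
    intro s hs
    have : s = [] := List.eq_nil_of_length_eq_zero (Nat.le_zero.mp hs)
    subst this; simp [aLoop, bScan]
  | succ n ih =>
    intro s hs
    match s with
    | [] => simp [aLoop, bScan]
    | m :: rest =>
      by_cases hk : bKey pos m
      · rw [aLoop_run pos (m :: rest) "" 0]
        rw [List.dropWhile_cons_of_pos hk]
        rw [ih _ (le_trans (List.length_dropWhile_le _ _) (Nat.le_of_succ_le_succ hs))]
        rw [bScan]
        simp only [hk, if_true]
        congr 1
        have hc : ((0:Int) + ((List.takeWhile (bKey pos) (m :: rest)).length : Int) > 1) ↔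
            ((List.takeWhile (bKey pos) (m :: rest)).length > 1) := by omega
        rw [if_congr hc rfl rfl]
        split_ifs with h
        · simp
        · rfl
      · have hkf : bKey pos m = false := by revert hk; cases bKey pos m <;> simp
        have hk' : (pvGetItem m "pos" == pos) = false := by simpa [bKey] using hkf
        rw [bScan]
        simp only [hkf, Bool.false_eq_true, if_false]
        rw [← ih rest (Nat.le_of_succ_le_succ hs)]
        simp [aLoop, hk']

-- the outer `for sentence in sentences` loops agree
theorem outer_eq (pos : String) :
    ∀ (ss : List (List (List (String × String)))) (res : List String),
      ss.foldl (fun r s => aLoop pos r "" 0 s) res = ss.foldl (fun r s => r ++ bScan pos s) res := by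
  intro ss
  induction ss with
  | nil => intro res; rfl
  | cons s tl ih =>
    intro res
    simp only [List.foldl_cons]
    rw [aLoop_factor, aLoop_eq_bScan pos s.length s le_rfl, ih]

-- ===== VERDICT (by name: the statement is the Claim_ definition above) =====
theorem extract_consecutive_spec : Claim_equal_extract_consecutive := by
  intro sentences pos _ _
  unfold Spec_extract_consecutive extract_consecutive extract_consecutive_alt
  exact outer_eq pos sentences []
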